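-- pv_equiv track=rewrite | github.com/Peter-Win/WidePreprocessor | src3/out/formatter.py | getLastRowLength
-- ===== SOURCE A (Python) =====
-- def getLastRow(outRows):
-- 	return outRows[len(outRows)-1]
--
-- def getLastRowLength(outRows, style):
-- 	length = 0
-- 	j = 0
-- 	s = getLastRow(outRows)
-- 	while j < len(s):
-- 		if s[j] == '\t':
-- 			length += style['tabSize']
-- 		else:
-- 			length += 1
-- 		j += 1
-- 	return length
-- ===== SOURCE B (Python) =====
-- def getLastRow(outRows):
-- 	return outRows[len(outRows)-1]
--
-- def getLastRowLength(outRows, style):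
-- 	parts = getLastRow(outRows).split('\t')
-- 	return sum(len(p) for p in parts) + (len(parts) - 1) * style['tabSize']
-- ===== Notes on version B (the rewrite author's own statement) =====
-- stated objective: alternative
-- what changed: Splits the last row into tab-separated segments and computes width as the sum of segment lengths plus (number of segments - 1) * tabSize, instead of A's per-character accumulate-and-branch loop.
-- outside the precondition, e.g. on getLastRowLength(['ab'], {}): A returns 2, B raises KeyError
import Mathlib
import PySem

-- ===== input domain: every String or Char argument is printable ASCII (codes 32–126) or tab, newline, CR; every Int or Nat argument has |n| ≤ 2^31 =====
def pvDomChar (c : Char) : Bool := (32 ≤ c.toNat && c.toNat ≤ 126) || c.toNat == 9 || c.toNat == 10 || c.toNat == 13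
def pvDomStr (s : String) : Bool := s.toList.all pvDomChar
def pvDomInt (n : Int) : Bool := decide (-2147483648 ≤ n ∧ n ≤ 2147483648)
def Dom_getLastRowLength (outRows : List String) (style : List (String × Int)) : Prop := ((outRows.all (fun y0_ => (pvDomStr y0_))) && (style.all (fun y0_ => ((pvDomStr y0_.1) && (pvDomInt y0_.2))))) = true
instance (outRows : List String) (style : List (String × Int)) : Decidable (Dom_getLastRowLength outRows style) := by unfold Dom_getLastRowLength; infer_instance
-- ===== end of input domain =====

-- B splits the last row into tab-separated segments and combines segment lengths
-- arithmetically with tabSize, instead of A's per-character loop; objective: alternative.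


-- ===== PORT A =====
-- helper getLastRow: outRows[len(outRows)-1]; total form, exact under Pre_ (outRows ≠ [])
def getLastRow (outRows : List String) : String :=
  PySem.List.pyGetD outRows ((outRows.length : Int) - 1) ""

def getLastRowLength (outRows : List String) (style : List (String × Int)) : Int :=
  let s := getLastRow outRows
  -- while j < len(s): branch on s[j], accumulate; style['tabSize'] looked up in the tab branch
  s.toList.foldl
    (fun length c =>
      if c == '\t' then length + (PySem.Dict.ofList style).getD "tabSize" 0
      else length + 1) 0

-- ===== PORT B =====
-- hand port of Python str.split('\t') for a single-character separator: exact
-- (''.split('\t') = [''], adjacent tabs give empty segments)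
def splitTab : List Char → List (List Char)
  | [] => [[]]
  | c :: cs =>
    match splitTab cs with
    | [] => [[c]]  -- unreachable: splitTab never returns []
    | p :: ps => if c == '\t' then [] :: p :: ps else (c :: p) :: ps

def getLastRowLength_alt (outRows : List String) (style : List (String × Int)) : Int :=
  let parts := splitTab (getLastRow outRows).toList
  (parts.map (fun p => (p.length : Int))).sum
    + ((parts.length : Int) - 1) * (PySem.Dict.ofList style).getD "tabSize" 0

-- ===== PRECONDITION & SPEC =====
-- Pre_ excludes empty outRows (A raises IndexError) and styles without a 'tabSize' key:
-- there A raises KeyError whenever the last row contains a tab, and returns len(s) only by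
-- the accident of its lazy per-character lookup; B's own algorithm raises KeyError there.
def Pre_getLastRowLength (outRows : List String) (style : List (String × Int)) : Prop :=
  outRows ≠ [] ∧ (PySem.Dict.ofList style).contains "tabSize" = true
instance (outRows : List String) (style : List (String × Int)) : Decidable (Pre_getLastRowLength outRows style) := by unfold Pre_getLastRowLength; infer_instance

def pvWitness_getLastRowLength : List String × (List (String × Int)) :=
  (["a\tb"], [("tabSize", 4)])

def Spec_getLastRowLength (outRows : List String) (style : List (String × Int)) (out : Int) : Prop := out = getLastRowLength_alt outRows style
instance (outRows : List String) (style : List (String × Int)) (out : Int) : Decidable (Spec_getLastRowLength outRows style out) := by unfold Spec_getLastRowLength; infer_instance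

-- ===== CLAIM (what is proved, stated in full; the proofs are below) =====
def Claim_equal_getLastRowLength : Prop := ∀ (outRows : List String) (style : List (String × Int)), Dom_getLastRowLength outRows style → Pre_getLastRowLength outRows style → Spec_getLastRowLength outRows style (getLastRowLength outRows style)

-- ===== LEMMAS AND PROOFS =====
theorem foldl_tab_closed (t : Int) (l : List Char) (acc : Int) :
    l.foldl (fun a c => if c == '\t' then a + t else a + 1) acc
      = acc + l.length + ((l.filter (fun c => c == '\t')).length : Int) * (t - 1) := by
  induction l generalizing acc with
  | nil => simp
  | cons c cs ih =>
    simp only [List.foldl_cons, List.filter_cons]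
    by_cases h : (c == '\t') = true
    · rw [if_pos h, if_pos h, ih]; push_cast [List.length_cons]; ring
    · rw [if_neg h, if_neg h, ih]; push_cast [List.length_cons]; ring

-- invariant of the split: segment lengths sum to (non-tab chars), #segments = #tabs + 1
theorem splitTab_spec (l : List Char) :
    ((splitTab l).map List.length).sum + (l.filter (fun c => c == '\t')).length = l.length
    ∧ (splitTab l).length = (l.filter (fun c => c == '\t')).length + 1 := by
  induction l with
  | nil => simp [splitTab]
  | cons c cs ih =>
    obtain ⟨ih1, ih2⟩ := ih
    rcases h : splitTab cs with _ | ⟨p, ps⟩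
    · rw [h] at ih2; simp at ih2
    · rw [h] at ih1 ih2
      by_cases hc : (c == '\t') = true
      · simp [splitTab, h, hc] at ih1 ih2 ⊢
        omega
      · simp [splitTab, h, hc] at ih1 ih2 ⊢
        constructor <;> omega

-- ===== VERDICT (by name: the statement is the Claim_ definition above) =====
theorem getLastRowLength_spec : Claim_equal_getLastRowLength := by
  intro outRows style _ _
  unfold Spec_getLastRowLength getLastRowLength getLastRowLength_alt
  simp only []
  rw [foldl_tab_closed]
  set s := (getLastRow outRows).toList
  obtain ⟨h1, h2⟩ := splitTab_spec s
  set t := (PySem.Dict.ofList style).getD "tabSize" 0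
  have hs : ∀ (L : List (List Char)), (L.map (fun p => (p.length : Int))).sum
      = ((L.map List.length).sum : Int) := by
    intro L; induction L with
    | nil => simp
    | cons a as ih => simp [ih]
  rw [hs]
  have h1' : (((splitTab s).map List.length).sum : Int)
      + ((s.filter (fun c => c == '\t')).length : Int) = (s.length : Int) := by
    exact_mod_cast congrArg (Nat.cast : ℕ → ℤ) h1
  have h2' : ((splitTab s).length : Int)
      = ((s.filter (fun c => c == '\t')).length : Int) + 1 := by
    exact_mod_cast congrArg (Nat.cast : ℕ → ℤ) h2
  rw [h2']
  ring_nf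
  linarith [h1']
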